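-- pv_equiv track=rewrite | github.com/sivertkh/aoc | aoc_2017/day_11/day_11_2.py | steps_from_start
-- ===== SOURCE A (Python) =====
-- def steps_from_start(pos_i, pos_j):
--
--     steps = 0
--
--     if pos_i < 0 > pos_j:
--         # move in the se direction
--         while pos_j != 0:
--             steps += 1
--             if pos_j % 2 == 0:
--                 # se(i, j+1)
--                 pos_i = pos_i
--                 pos_j += 1
--             else:
--                 # se(i+1, j+1)
--                 pos_i += 1
--                 pos_j += 1
--
--     elif pos_i < 0 < pos_j:
--         # move in the sw direction
--         while pos_j != 0:
--             steps += 1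
--             if pos_j % 2 == 0:
--                 # sw(i, j-1)
--                 pos_i = pos_i
--                 pos_j -= 1
--             else:
--                 # sw(i+1, j-1)
--                 pos_i += 1
--                 pos_j -= 1
--
--     elif pos_i > 0 > pos_j:
--         # move in the ne direction
--         while pos_j != 0:
--             steps += 1
--             if pos_j % 2 == 0:
--                 # ne(i-1, j+1)
--                 pos_i -= 1
--                 pos_j += 1
--             else:
--                 # ne(i, j+1)
--                 pos_i = pos_i
--                 pos_j += 1
--
--     elif pos_i > 0 < pos_j:
--         # move in the nw direction
--         while pos_j != 0:
--             steps += 1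
--             if pos_j % 2 == 0:
--                 pass
--                 # nw(i-1, j-1),
--                 pos_i -= 1
--                 pos_j -= 1
--             else:
--                 # nw(i, j-1)
--                 pos_i = pos_i
--                 pos_j -= 1
--
--     steps += abs(pos_i)
--     return steps
-- ===== SOURCE B (Python) =====
-- def steps_from_start(pos_i, pos_j):
--     n = abs(pos_j)
--     if pos_i < 0 and pos_j != 0:
--         return n + abs(pos_i + (n + 1) // 2)
--     if pos_i > 0 and pos_j != 0:
--         return n + abs(pos_i - n // 2)
--     return abs(pos_i)
-- ===== Notes on version B (the rewrite author's own statement) =====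
-- stated objective: faster
-- what changed: Replaced the four step-by-step walking loops (O(|pos_j|) iterations toward j=0) with a closed-form formula: the loop always runs |pos_j| times and its net effect on pos_i is a parity count, (|pos_j|+1)//2 toward positive for pos_i<0 and |pos_j|//2 toward negative for pos_i>0.
import Mathlib
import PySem

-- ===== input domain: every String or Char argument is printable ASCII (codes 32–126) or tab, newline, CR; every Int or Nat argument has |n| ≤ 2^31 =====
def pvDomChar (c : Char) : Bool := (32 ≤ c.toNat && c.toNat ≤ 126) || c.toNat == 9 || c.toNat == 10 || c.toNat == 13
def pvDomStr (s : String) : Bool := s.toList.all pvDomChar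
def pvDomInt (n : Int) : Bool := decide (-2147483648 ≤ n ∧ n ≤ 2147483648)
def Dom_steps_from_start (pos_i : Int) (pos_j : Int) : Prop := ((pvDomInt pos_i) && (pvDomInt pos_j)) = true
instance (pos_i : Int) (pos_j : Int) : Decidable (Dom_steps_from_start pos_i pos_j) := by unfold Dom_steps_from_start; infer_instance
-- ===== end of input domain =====

-- B replaces A's four step-by-step walking loops by a closed-form parity count (O(1) instead of O(|pos_j|)).

-- ===== PORT A =====
-- Each 'while pos_j != 0' loop of A is ported as structural recursion on a fuel
-- of pos_j.natAbs (a totality guard only: inside each branch |pos_j| shrinks by 1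
-- per iteration, so the fuel is never exhausted early). State = (steps, pos_i, pos_j).

-- se branch: while pos_j != 0: steps+=1; if pos_j%2==0 then j+=1 else (i+=1; j+=1)
def seLoop : Nat → Int → Int → Int → Int × Int
  | 0, steps, i, _ => (steps, i)
  | Nat.succ f, steps, i, j =>
    if j ≠ 0 then
      if PySem.Int.mod j 2 = 0 then seLoop f (steps + 1) i (j + 1)
      else seLoop f (steps + 1) (i + 1) (j + 1)
    else (steps, i)

-- sw branch: if pos_j%2==0 then j-=1 else (i+=1; j-=1)
def swLoop : Nat → Int → Int → Int → Int × Int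
  | 0, steps, i, _ => (steps, i)
  | Nat.succ f, steps, i, j =>
    if j ≠ 0 then
      if PySem.Int.mod j 2 = 0 then swLoop f (steps + 1) i (j - 1)
      else swLoop f (steps + 1) (i + 1) (j - 1)
    else (steps, i)

-- ne branch: if pos_j%2==0 then (i-=1; j+=1) else j+=1
def neLoop : Nat → Int → Int → Int → Int × Int
  | 0, steps, i, _ => (steps, i)
  | Nat.succ f, steps, i, j =>
    if j ≠ 0 then
      if PySem.Int.mod j 2 = 0 then neLoop f (steps + 1) (i - 1) (j + 1)
      else neLoop f (steps + 1) i (j + 1)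
    else (steps, i)

-- nw branch: if pos_j%2==0 then (i-=1; j-=1) else j-=1
def nwLoop : Nat → Int → Int → Int → Int × Int
  | 0, steps, i, _ => (steps, i)
  | Nat.succ f, steps, i, j =>
    if j ≠ 0 then
      if PySem.Int.mod j 2 = 0 then nwLoop f (steps + 1) (i - 1) (j - 1)
      else nwLoop f (steps + 1) i (j - 1)
    else (steps, i)

def steps_from_start (pos_i : Int) (pos_j : Int) : Int :=
  let steps : Int := 0
  if pos_i < 0 ∧ 0 > pos_j then
    let r := seLoop pos_j.natAbs steps pos_i pos_j
    r.1 + |r.2|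
  else if pos_i < 0 ∧ 0 < pos_j then
    let r := swLoop pos_j.natAbs steps pos_i pos_j
    r.1 + |r.2|
  else if pos_i > 0 ∧ 0 > pos_j then
    let r := neLoop pos_j.natAbs steps pos_i pos_j
    r.1 + |r.2|
  else if pos_i > 0 ∧ 0 < pos_j then
    let r := nwLoop pos_j.natAbs steps pos_i pos_j
    r.1 + |r.2|
  else
    steps + |pos_i|

-- ===== PORT B =====
def steps_from_start_alt (pos_i : Int) (pos_j : Int) : Int :=
  let n : Int := |pos_j|
  if pos_i < 0 ∧ pos_j ≠ 0 then
    n + |pos_i + PySem.Int.floordiv (n + 1) 2|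
  else if pos_i > 0 ∧ pos_j ≠ 0 then
    n + |pos_i - PySem.Int.floordiv n 2|
  else
    |pos_i|

-- ===== PRECONDITION & SPEC =====
def Spec_steps_from_start (pos_i : Int) (pos_j : Int) (out : Int) : Prop := out = steps_from_start_alt pos_i pos_j
instance (pos_i : Int) (pos_j : Int) (out : Int) : Decidable (Spec_steps_from_start pos_i pos_j out) := by unfold Spec_steps_from_start; infer_instance

-- ===== CLAIM (what is proved, stated in full; the proofs are below) =====
def Claim_equal_steps_from_start : Prop := ∀ (pos_i : Int) (pos_j : Int), Dom_steps_from_start pos_i pos_j → Spec_steps_from_start pos_i pos_j (steps_from_start pos_i pos_j)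

-- ===== LEMMAS AND PROOFS =====

theorem seLoop_eq (n : Nat) : ∀ (steps i : Int),
    seLoop n steps i (-(n : Int)) = (steps + n, i + (((n + 1) / 2 : Nat) : Int)) := by
  induction n with
  | zero => intro steps i; simp [seLoop]
  | succ m ih =>
    intro steps i
    have hj : (-((m + 1 : Nat) : Int)) ≠ 0 := by push_cast; omega
    have harg : (-((m + 1 : Nat) : Int)) + 1 = -(m : Int) := by push_cast; ring
    have hmod : PySem.Int.mod (-((m + 1 : Nat) : Int)) 2 = (-((m + 1 : Nat) : Int)) % 2 :=
      PySem.Int.mod_eq_emod_of_pos (by norm_num)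
    simp only [seLoop, hj, hmod, harg, ne_eq, not_false_eq_true, if_pos]
    by_cases hpar : (-((m + 1 : Nat) : Int)) % 2 = 0
    · rw [if_pos hpar, ih]
      refine Prod.ext ?_ ?_ <;> simp <;> [push_cast; skip] <;> omega
    · rw [if_neg hpar, ih]
      refine Prod.ext ?_ ?_ <;> simp <;> [push_cast; skip] <;> omega

theorem swLoop_eq (n : Nat) : ∀ (steps i : Int),
    swLoop n steps i (n : Int) = (steps + n, i + (((n + 1) / 2 : Nat) : Int)) := by
  induction n with
  | zero => intro steps i; simp [swLoop]
  | succ m ih =>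
    intro steps i
    have hj : ((m + 1 : Nat) : Int) ≠ 0 := by push_cast; omega
    have harg : ((m + 1 : Nat) : Int) - 1 = (m : Int) := by push_cast; ring
    have hmod : PySem.Int.mod ((m + 1 : Nat) : Int) 2 = ((m + 1 : Nat) : Int) % 2 :=
      PySem.Int.mod_eq_emod_of_pos (by norm_num)
    simp only [swLoop, hj, hmod, harg, ne_eq, not_false_eq_true, if_pos]
    by_cases hpar : (((m + 1 : Nat) : Int)) % 2 = 0
    · rw [if_pos hpar, ih]
      refine Prod.ext ?_ ?_ <;> simp <;> [push_cast; skip] <;> omega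
    · rw [if_neg hpar, ih]
      refine Prod.ext ?_ ?_ <;> simp <;> [push_cast; skip] <;> omega

theorem neLoop_eq (n : Nat) : ∀ (steps i : Int),
    neLoop n steps i (-(n : Int)) = (steps + n, i - ((n / 2 : Nat) : Int)) := by
  induction n with
  | zero => intro steps i; simp [neLoop]
  | succ m ih =>
    intro steps i
    have hj : (-((m + 1 : Nat) : Int)) ≠ 0 := by push_cast; omega
    have harg : (-((m + 1 : Nat) : Int)) + 1 = -(m : Int) := by push_cast; ring
    have hmod : PySem.Int.mod (-((m + 1 : Nat) : Int)) 2 = (-((m + 1 : Nat) : Int)) % 2 :=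
      PySem.Int.mod_eq_emod_of_pos (by norm_num)
    simp only [neLoop, hj, hmod, harg, ne_eq, not_false_eq_true, if_pos]
    by_cases hpar : (-((m + 1 : Nat) : Int)) % 2 = 0
    · rw [if_pos hpar, ih]
      refine Prod.ext ?_ ?_ <;> simp <;> [push_cast; skip] <;> omega
    · rw [if_neg hpar, ih]
      refine Prod.ext ?_ ?_ <;> simp <;> [push_cast; skip] <;> omega

theorem nwLoop_eq (n : Nat) : ∀ (steps i : Int),
    nwLoop n steps i (n : Int) = (steps + n, i - ((n / 2 : Nat) : Int)) := by
  induction n with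
  | zero => intro steps i; simp [nwLoop]
  | succ m ih =>
    intro steps i
    have hj : ((m + 1 : Nat) : Int) ≠ 0 := by push_cast; omega
    have harg : ((m + 1 : Nat) : Int) - 1 = (m : Int) := by push_cast; ring
    have hmod : PySem.Int.mod ((m + 1 : Nat) : Int) 2 = ((m + 1 : Nat) : Int) % 2 :=
      PySem.Int.mod_eq_emod_of_pos (by norm_num)
    simp only [nwLoop, hj, hmod, harg, ne_eq, not_false_eq_true, if_pos]
    by_cases hpar : (((m + 1 : Nat) : Int)) % 2 = 0
    · rw [if_pos hpar, ih]
      refine Prod.ext ?_ ?_ <;> simp <;> [push_cast; skip] <;> omega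
    · rw [if_neg hpar, ih]
      refine Prod.ext ?_ ?_ <;> simp <;> [push_cast; skip] <;> omega

-- ===== VERDICT (by name: the statement is the Claim_ definition above) =====
theorem pv_fd2 (m : Nat) : PySem.Int.floordiv ((m : Int)) 2 = ((m / 2 : Nat) : Int) := by
  exact_mod_cast PySem.Int.floordiv_natCast m 2

theorem steps_from_start_spec : Claim_equal_steps_from_start := by
  intro pos_i pos_j _
  unfold Spec_steps_from_start steps_from_start steps_from_start_alt
  have hneg : -((pos_j.natAbs : Nat) : Int) = pos_j ∨ ((pos_j.natAbs : Nat) : Int) = pos_j := by omega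
  have hse := seLoop_eq pos_j.natAbs 0 pos_i
  have hsw := swLoop_eq pos_j.natAbs 0 pos_i
  have hne := neLoop_eq pos_j.natAbs 0 pos_i
  have hnw := nwLoop_eq pos_j.natAbs 0 pos_i
  have hfd1 : PySem.Int.floordiv (((pos_j.natAbs : Nat) : Int) + 1) 2 = (((pos_j.natAbs + 1) / 2 : Nat) : Int) := by
    rw [show ((pos_j.natAbs : Nat) : Int) + 1 = (((pos_j.natAbs + 1 : Nat)) : Int) by push_cast; ring]
    exact pv_fd2 _
  have hfd2 : PySem.Int.floordiv ((pos_j.natAbs : Nat) : Int) 2 = ((pos_j.natAbs / 2 : Nat) : Int) :=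
    pv_fd2 _
  split_ifs with h1 h2 h3 h4 h5 h6 h7 h8 h9 h10 <;> dsimp only <;>
  first
    | omega
    | (rcases hneg with h' | h' <;>
       first
         | omega
         | ((first
             | (rw [h'] at hse; rw [hse])
             | (rw [h'] at hsw; rw [hsw])
             | (rw [h'] at hne; rw [hne])
             | (rw [h'] at hnw; rw [hnw])) <;>
           (simp only [Int.abs_eq_natAbs, hfd1, hfd2]; omega)))
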